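-- pv_equiv track=rewrite | github.com/allenwind/chinese-cut-word | viterbi.py | segment_by_tags
-- ===== SOURCE A (Python) =====
-- def segment_by_tags(tags, sentence):
--     # 通过SBME序列对sentence分词
--     assert len(tags) == len(sentence)
--     buf = ""
--     for t, c in zip(tags, sentence):
--         # t is S or B
--         if t in [0, 1]:
--             if buf:
--                 yield buf
--             buf = c
--         # t is M or E
--         else:
--             buf += c
--     if buf:
--         yield buf
-- ===== SOURCE B (Python) =====
-- def segment_by_tags(tags, sentence):
--     # Boundary-scan decomposition: find the next word boundary, yield the slice.
--     assert len(tags) == len(sentence)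
--     pairs = list(zip(tags, sentence))
--     while pairs:
--         _, c = pairs[0]
--         k = 1
--         while k < len(pairs) and pairs[k][0] not in (0, 1):
--             k += 1
--         yield c + "".join(ch for _, ch in pairs[1:k])
--         pairs = pairs[k:]
-- ===== Notes on version B (the rewrite author's own statement) =====
-- stated objective: alternative
-- what changed: B replaces A's char-by-char buffer accumulation with a boundary scan: it finds the next S/B boundary and yields the whole segment slice at once, looping segment by segment instead of char by char.
import Mathlib
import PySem

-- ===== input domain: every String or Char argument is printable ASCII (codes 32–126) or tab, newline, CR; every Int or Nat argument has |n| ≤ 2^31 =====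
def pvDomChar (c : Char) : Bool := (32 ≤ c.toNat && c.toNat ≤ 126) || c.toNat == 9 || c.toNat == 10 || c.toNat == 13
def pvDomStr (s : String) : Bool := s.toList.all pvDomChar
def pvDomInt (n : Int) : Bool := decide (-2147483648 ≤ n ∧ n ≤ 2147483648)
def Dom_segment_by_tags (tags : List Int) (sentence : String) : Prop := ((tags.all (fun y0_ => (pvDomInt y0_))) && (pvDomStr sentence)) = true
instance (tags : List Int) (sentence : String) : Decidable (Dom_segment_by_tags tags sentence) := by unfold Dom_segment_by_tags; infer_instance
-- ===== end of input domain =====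

-- B scans to the next S/B boundary and emits the whole segment at once, instead of A's
-- char-by-char buffer accumulation; same cost, different decomposition. Equivalence is on
-- the materialised generator output (list of yields).

-- ===== PORT A =====
-- A's loop over zip(tags, sentence) with buffer `buf` (List Char) and accumulated yields `acc`.
def segAloop : List (Int × Char) → List Char → List String → List String
  | [], buf, acc => if buf.isEmpty then acc else acc ++ [String.ofList buf]
  | (t, c) :: rest, buf, acc =>
    if t = 0 ∨ t = 1 then
      segAloop rest [c] (if buf.isEmpty then acc else acc ++ [String.ofList buf])
    else
      segAloop rest (buf ++ [c]) acc

def segment_by_tags (tags : List Int) (sentence : String) : List String :=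
  segAloop (tags.zip sentence.toList) [] []

-- ===== PORT B =====
-- Source B's outer while over the remaining pairs; the inner index loop computing k is the
-- takeWhile/dropWhile split of the tail at the next tag in {0,1}.
def segment_by_tags_alt_loop : List (Int × Char) → List String
  | [] => []
  | (_, c) :: rest =>
    String.ofList (c :: (rest.takeWhile (fun p => !(p.1 == 0 || p.1 == 1))).map Prod.snd)
      :: segment_by_tags_alt_loop (rest.dropWhile (fun p => !(p.1 == 0 || p.1 == 1)))
termination_by pairs => pairs.length
decreasing_by
  have := List.length_dropWhile_le (l := rest) (p := fun p : Int × Char => !(p.1 == 0 || p.1 == 1))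
  simpa using Nat.lt_succ_of_le this

def segment_by_tags_alt (tags : List Int) (sentence : String) : List String :=
  segment_by_tags_alt_loop (tags.zip sentence.toList)

-- ===== PRECONDITION & SPEC =====
-- A asserts len(tags) == len(sentence): on unequal lengths A raises AssertionError.
def Pre_segment_by_tags (tags : List Int) (sentence : String) : Prop :=
  tags.length = sentence.toList.length
instance (tags : List Int) (sentence : String) : Decidable (Pre_segment_by_tags tags sentence) := by unfold Pre_segment_by_tags; infer_instance
def pvWitness_segment_by_tags : List Int × String := ([1, 2, 0, 3, 3, 2], "hi you")

def Spec_segment_by_tags (tags : List Int) (sentence : String) (out : List String) : Prop := out = segment_by_tags_alt tags sentence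
instance (tags : List Int) (sentence : String) (out : List String) : Decidable (Spec_segment_by_tags tags sentence out) := by unfold Spec_segment_by_tags; infer_instance

-- ===== CLAIM (what is proved, stated in full; the proofs are below) =====
def Claim_equal_segment_by_tags : Prop := ∀ (tags : List Int) (sentence : String), Dom_segment_by_tags tags sentence → Pre_segment_by_tags tags sentence → Spec_segment_by_tags tags sentence (segment_by_tags tags sentence)

-- ===== LEMMAS AND PROOFS =====

theorem alt_loop_nil : segment_by_tags_alt_loop [] = [] := by
  rw [segment_by_tags_alt_loop.eq_def]

theorem alt_loop_cons (t : Int) (c : Char) (rest : List (Int × Char)) :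
    segment_by_tags_alt_loop ((t, c) :: rest) =
      String.ofList (c :: (rest.takeWhile (fun p => !(p.1 == 0 || p.1 == 1))).map Prod.snd)
        :: segment_by_tags_alt_loop (rest.dropWhile (fun p => !(p.1 == 0 || p.1 == 1))) := by
  rw [segment_by_tags_alt_loop.eq_def]

-- Invariant: with a nonempty buffer, A's loop emits acc, then buf extended to the next
-- boundary, then B's segmentation of the remainder.
theorem segAloop_eq (pairs : List (Int × Char)) : ∀ (buf : List Char) (acc : List String),
    buf ≠ [] →
    segAloop pairs buf acc =
      acc ++ (String.ofList (buf ++ (pairs.takeWhile (fun p => !(p.1 == 0 || p.1 == 1))).map Prod.snd)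
        :: segment_by_tags_alt_loop (pairs.dropWhile (fun p => !(p.1 == 0 || p.1 == 1)))) := by
  induction pairs with
  | nil =>
    intro buf acc hbuf
    simp [segAloop, List.isEmpty_iff, hbuf, alt_loop_nil]
  | cons hd tl ih =>
    intro buf acc hbuf
    obtain ⟨t, c⟩ := hd
    by_cases hb : t = 0 ∨ t = 1
    · have hB : (!((t == 0) || (t == 1))) = false := by
        rcases hb with h | h <;> simp [h]
      rw [segAloop]
      simp only [hb, if_true, List.isEmpty_iff, hbuf]
      rw [ih [c] _ (by simp)]
      rw [List.takeWhile_cons, List.dropWhile_cons]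
      simp only [hB, Bool.false_eq_true, if_false]
      rw [alt_loop_cons]
      simp
    · have hB : (!((t == 0) || (t == 1))) = true := by
        simp only [Bool.not_eq_true', Bool.or_eq_false_iff, beq_eq_false_iff_ne]
        constructor <;> intro h <;> exact hb (by simp [h])
      rw [segAloop]
      simp only [hb, if_false]
      rw [ih (buf ++ [c]) acc (by simp)]
      rw [List.takeWhile_cons, List.dropWhile_cons]
      simp [hB]

theorem segAloop_start (pairs : List (Int × Char)) :
    segAloop pairs [] [] = segment_by_tags_alt_loop pairs := by
  cases pairs with
  | nil => rw [alt_loop_nil]; simp [segAloop]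
  | cons hd tl =>
    obtain ⟨t, c⟩ := hd
    rw [segAloop, segment_by_tags_alt_loop]
    by_cases hb : t = 0 ∨ t = 1 <;>
      simp only [hb, if_true, if_false, List.isEmpty_nil, List.nil_append] <;>
      rw [segAloop_eq tl [c] [] (by simp)] <;> simp

-- ===== VERDICT (by name: the statement is the Claim_ definition above) =====
theorem segment_by_tags_spec : Claim_equal_segment_by_tags := by
  intro tags sentence _ _
  unfold Spec_segment_by_tags segment_by_tags segment_by_tags_alt
  exact segAloop_start _
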